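-- pv_equiv track=rewrite | github.com/SeppiaBrilla/AOC2024 | 12/day12_pt2.py | get_vertical_contiguos
-- ===== SOURCE A (Python) =====
-- def get_vertical_contiguos(t:int, top_places:list) -> int:
--     sorted_places = [(i,j) for (i,j) in sorted(top_places) if i == t]
--     tops = 1 if len(sorted_places) >= 1 else 0
--     for p in range(1, len(sorted_places)):
--         _, j = sorted_places[p]
--         _, pj = sorted_places[p-1]
--         if pj != j-1:
--             tops += 1
--     return tops
-- ===== SOURCE B (Python) =====
-- def get_vertical_contiguos(t: int, top_places: list) -> int:
--     js = [j for (i, j) in top_places if i == t]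
--     keys = set(js)
--     connections = sum(1 for v in keys if v - 1 in keys)
--     return len(js) - connections
-- ===== Notes on version B (the rewrite author's own statement) =====
-- stated objective: alternative
-- what changed: Replaces A's sort-then-scan-adjacent-pairs (sort the whole list, filter row t, count breaks between consecutive entries by index) with a sort-free counting argument: total number of row-t entries minus the number of distinct column values whose left neighbour column is also present.
import Mathlib
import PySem

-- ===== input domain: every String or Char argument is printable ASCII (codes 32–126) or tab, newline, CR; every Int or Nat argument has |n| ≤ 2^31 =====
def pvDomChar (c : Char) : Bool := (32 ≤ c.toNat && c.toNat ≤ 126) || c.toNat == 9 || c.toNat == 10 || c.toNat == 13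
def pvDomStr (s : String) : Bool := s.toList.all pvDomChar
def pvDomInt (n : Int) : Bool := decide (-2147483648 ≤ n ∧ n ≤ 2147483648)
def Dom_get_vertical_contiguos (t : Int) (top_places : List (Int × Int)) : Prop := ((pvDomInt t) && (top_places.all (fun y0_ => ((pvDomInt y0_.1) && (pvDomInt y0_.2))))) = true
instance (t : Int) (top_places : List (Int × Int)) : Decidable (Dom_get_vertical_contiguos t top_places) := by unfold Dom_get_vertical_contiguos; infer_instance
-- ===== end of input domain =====

-- B counts the row-t entries (with multiplicity) and subtracts the number of distinct column
-- values whose left neighbour column is also present — no sort, no index loop (objective: alternative).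

-- ===== PORT A =====
def get_vertical_contiguos (t : Int) (top_places : List (Int × Int)) : Int :=
  let sorted_places := (PySem.List.sorted2 top_places (fun p => p.1) (fun p => p.2)).filter (fun p => p.1 == t)
  let tops : Int := if 1 ≤ sorted_places.length then 1 else 0
  (PySem.List.pyRange 1 (sorted_places.length : Int) 1).foldl
    (fun tops p =>
      let j := (PySem.List.pyGetD sorted_places p ((0 : Int), (0 : Int))).2
      let pj := (PySem.List.pyGetD sorted_places (p - 1) ((0 : Int), (0 : Int))).2
      if pj ≠ j - 1 then tops + 1 else tops)
    tops

-- ===== PORT B =====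
def get_vertical_contiguos_alt (t : Int) (top_places : List (Int × Int)) : Int :=
  let js := (top_places.filter (fun p => p.1 == t)).map (fun p => p.2)
  let keys : PySem.Set Int := PySem.Set.ofList js
  let connections : Int := (keys.countP (fun v => PySem.Set.contains keys (v - 1)) : Nat)
  (js.length : Int) - connections

-- ===== PRECONDITION & SPEC =====
def Spec_get_vertical_contiguos (t : Int) (top_places : List (Int × Int)) (out : Int) : Prop := out = get_vertical_contiguos_alt t top_places
instance (t : Int) (top_places : List (Int × Int)) (out : Int) : Decidable (Spec_get_vertical_contiguos t top_places out) := by unfold Spec_get_vertical_contiguos; infer_instance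

-- ===== CLAIM (what is proved, stated in full; the proofs are below) =====
def Claim_equal_get_vertical_contiguos : Prop := ∀ (t : Int) (top_places : List (Int × Int)), Dom_get_vertical_contiguos t top_places → Spec_get_vertical_contiguos t top_places (get_vertical_contiguos t top_places)

-- ===== LEMMAS AND PROOFS =====

-- distinct column values of u whose left neighbour is also a value of u
def connFinset (u : List Int) : Finset Int := u.toFinset.filter (fun v => v - 1 ∈ u.toFinset)

-- sorted2's comparison on Int pairs is the lexicographic strict order
lemma before_eq_lex :
    (fun a b : Int × Int => (decide (a.1 < b.1) || (!decide (b.1 < a.1) && decide (a.2 < b.2))))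
    = (fun a b : Int × Int => decide ((toLex a : Lex (Int × Int)) < toLex b)) := by
  funext a b
  rw [Bool.eq_iff_iff]
  simp only [Bool.or_eq_true, Bool.and_eq_true, Bool.not_eq_true', decide_eq_true_eq,
    decide_eq_false_iff_not, Prod.Lex.lt_iff]
  simp only [ofLex_toLex]
  omega

lemma foldl_insertBy_pairwise {α κ : Type} [LinearOrder κ] (key : α → κ) (xs : List α)
    (acc : List α) (h : acc.Pairwise (fun a b => key a ≤ key b)) :
    (xs.foldl (fun acc x => PySem.List.insertBy (fun a b => decide (key a < key b)) x acc) acc).Pairwise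
      (fun a b => key a ≤ key b) := by
  induction xs generalizing acc with
  | nil => exact h
  | cons x xs ih => exact ih _ (PySem.List.insertBy_pairwise_le key x acc h)

lemma sorted2_pairwise_lex (xs : List (Int × Int)) :
    (PySem.List.sorted2 xs (fun p => p.1) (fun p => p.2)).Pairwise
      (fun a b => (toLex a : Lex (Int × Int)) ≤ toLex b) := by
  have h := foldl_insertBy_pairwise (fun p : Int × Int => (toLex p : Lex (Int × Int))) xs [] (by simp)
  rw [← before_eq_lex] at h
  simpa [PySem.List.sorted2] using h

-- the columns of the row-t entries of the sorted list are sorted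
lemma filtered_snd_pairwise (t : Int) (xs : List (Int × Int)) :
    (((PySem.List.sorted2 xs (fun p => p.1) (fun p => p.2)).filter (fun p => p.1 == t)).map
      (fun p => p.2)).Pairwise (· ≤ ·) := by
  rw [List.pairwise_map]
  refine ((sorted2_pairwise_lex xs).filter (fun p => p.1 == t)).imp_of_mem ?_
  intro a b ha hb hab
  have ha' : a.1 = t := by simpa using (List.mem_filter.mp ha).2
  have hb' : b.1 = t := by simpa using (List.mem_filter.mp hb).2
  rcases Prod.Lex.le_iff.mp hab with h | ⟨_, h2⟩
  · simp only [ofLex_toLex] at h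
    omega
  · simpa using h2

-- A's index loop reads exactly the adjacent column pairs
lemma rangeMap_eq_zip (s : List (Int × Int)) :
    (PySem.List.pyRange 1 (s.length : Int) 1).map
      (fun p => ((PySem.List.pyGetD s (p - 1) ((0 : Int), (0 : Int))).2,
                 (PySem.List.pyGetD s p ((0 : Int), (0 : Int))).2))
    = (s.map (fun p => p.2)).zip ((s.map (fun p => p.2)).tail) := by
  apply List.ext_getElem
  · simp [PySem.List.length_pyRange_one]
  · intro k h1 h2
    have hk : k + 1 < s.length := by
      simp only [List.length_map, PySem.List.length_pyRange_one] at h1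
      omega
    simp only [List.getElem_map, PySem.List.getElem_pyRange_one, List.getElem_zip,
      List.getElem_tail]
    have e1 : PySem.List.pyGetD s (1 + (k : Int) - 1) ((0 : Int), (0 : Int))
        = s[(1 + (k : Int) - 1).toNat]'(by omega) :=
      PySem.List.pyGetD_eq_getElem s _ (by omega) (by omega)
    have e2 : PySem.List.pyGetD s (1 + (k : Int)) ((0 : Int), (0 : Int))
        = s[(1 + (k : Int)).toNat]'(by omega) :=
      PySem.List.pyGetD_eq_getElem s _ (by omega) (by omega)
    rw [e1, e2]
    have i1 : (1 + (k : Int) - 1).toNat = k := by omega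
    have i2 : (1 + (k : Int)).toNat = k + 1 := by omega
    simp_rw [i1, i2]

lemma connFinset_step (x y : Int) (ys : List Int)
    (hx : ∀ z ∈ y :: ys, x ≤ z) (hy : ∀ z ∈ ys, y ≤ z) :
    ((connFinset (x :: y :: ys)).card : Int)
      = (connFinset (y :: ys)).card + (if y = x + 1 then 1 else 0) := by
  set S := (y :: ys).toFinset with hS
  have hSmem : ∀ z, z ∈ S → x ≤ z := by
    intro z hz
    exact hx z (by simpa [hS] using hz)
  have hSmin : ∀ z, z ∈ S → y ≤ z := by
    intro z hz
    rcases List.mem_cons.mp (by simpa [hS] using hz) with h | h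
    · exact le_of_eq h.symm
    · exact hy z h
  have hT : (x :: y :: ys).toFinset = insert x S := by simp [hS]
  have hxm1 : x - 1 ∉ insert x S := by
    intro hmem
    rcases Finset.mem_insert.mp hmem with h | h
    · omega
    · have := hSmem _ h
      omega
  unfold connFinset
  rw [hT, Finset.filter_insert, if_neg hxm1]
  by_cases hc : y = x + 1
  · have hxS : x ∉ S := by
      intro h
      have := hSmin _ h
      omega
    have hx1S : x + 1 ∈ S := by
      rw [← hc]
      simp [hS]
    have hfilter : S.filter (fun v => v - 1 ∈ insert x S)
        = insert (x + 1) (S.filter (fun v => v - 1 ∈ S)) := by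
      ext v
      simp only [Finset.mem_filter, Finset.mem_insert]
      constructor
      · rintro ⟨hv, (h | h)⟩
        · left
          omega
        · right
          exact ⟨hv, h⟩
      · rintro (h | ⟨hv, h⟩)
        · subst h
          exact ⟨hx1S, Or.inl (by ring)⟩
        · exact ⟨hv, Or.inr h⟩
    rw [hfilter, Finset.card_insert_of_notMem, if_pos hc]
    · push_cast
      ring
    · simp only [Finset.mem_filter, not_and]
      intro _ h
      have hx' : x + 1 - 1 = x := by ring
      rw [hx'] at h
      exact absurd h hxS
  · have hfilter : S.filter (fun v => v - 1 ∈ insert x S) = S.filter (fun v => v - 1 ∈ S) := by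
      apply Finset.filter_congr
      intro v hv
      simp only [Finset.mem_insert]
      constructor
      · rintro (h | h)
        · have h1 : y ≤ v := hSmin v hv
          have h2 : x ≤ y := hSmem y (by simp [hS])
          have hyx : y = x := by omega
          have hxmem : x ∈ S := by
            rw [← hyx]
            simp [hS]
          rwa [h]
        · exact h
      · exact fun h => Or.inr h
    rw [hfilter, if_neg hc]
    ring

-- segments = entries − connections, on a sorted column list
lemma mainCount (u : List Int) (h : u.Pairwise (· ≤ ·)) :
    (if 1 ≤ u.length then (1 : Int) else 0)
      + ((u.zip u.tail).countP (fun q => !(q.1 == q.2 - 1)) : Nat)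
    = (u.length : Int) - ((connFinset u).card : Int) := by
  induction u with
  | nil => simp [connFinset]
  | cons x xs ih =>
    cases xs with
    | nil =>
      have : connFinset [x] = ∅ := by
        unfold connFinset
        rw [Finset.filter_eq_empty_iff]
        intro v hv
        simp only [List.toFinset_cons, List.toFinset_nil, insert_empty_eq,
          Finset.mem_singleton] at hv ⊢
        omega
      simp [this]
    | cons y ys =>
      have hx : ∀ z ∈ y :: ys, x ≤ z := (List.pairwise_cons.mp h).1
      have hp : (y :: ys).Pairwise (· ≤ ·) := (List.pairwise_cons.mp h).2
      have hy : ∀ z ∈ ys, y ≤ z := (List.pairwise_cons.mp hp).1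
      have ih' := ih hp
      have hstep := connFinset_step x y ys hx hy
      have hz : (x :: y :: ys).zip ((x :: y :: ys).tail)
          = (x, y) :: ((y :: ys).zip ((y :: ys).tail)) := rfl
      have hcount : ((x, y) :: ((y :: ys).zip ((y :: ys).tail))).countP (fun q => !(q.1 == q.2 - 1))
          = ((y :: ys).zip ((y :: ys).tail)).countP (fun q => !(q.1 == q.2 - 1))
            + (if y = x + 1 then 0 else 1) := by
        rw [List.countP_cons]
        by_cases hxy : y = x + 1
        · have hb : (x == y - 1) = true := by
            simp only [beq_iff_eq]
            omega
          simp [hxy]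
        · have hb : (x == y - 1) = false := by
            simp only [beq_eq_false_iff_ne, ne_eq]
            omega
          simp [hxy, hb]
      rw [hz, hcount, if_pos (show 1 ≤ (x :: y :: ys).length by simp)]
      rw [if_pos (show 1 ≤ (y :: ys).length by simp)] at ih'
      simp only [List.length_cons] at ih' ⊢
      by_cases hxy : y = x + 1
      · rw [if_pos hxy] at hstep ⊢
        push_cast at ih' hstep ⊢
        omega
      · rw [if_neg hxy] at hstep ⊢
        push_cast at ih' hstep ⊢
        omega

-- B's set-based count is the distinct-connection count
lemma connCount (u : List Int) :
    (PySem.Set.ofList u).countP (fun v => PySem.Set.contains (PySem.Set.ofList u) (v - 1))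
      = (connFinset u).card := by
  have hnd : (PySem.Set.ofList u).Nodup := PySem.Set.nodup_ofList u
  rw [List.countP_eq_length_filter]
  have hndf := hnd.filter (p := fun v => PySem.Set.contains (PySem.Set.ofList u) (v - 1))
  rw [← List.Nodup.dedup hndf, ← List.card_toFinset]
  congr 1
  ext v
  simp only [List.mem_toFinset, List.mem_filter, PySem.Set.mem_ofList, connFinset,
    Finset.mem_filter]
  constructor
  · rintro ⟨hv, hc⟩
    have := (PySem.Set.contains_iff _ _).mp hc
    exact ⟨by simpa using hv, by simpa [PySem.Set.mem_ofList] using this⟩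
  · rintro ⟨hv, hc⟩
    refine ⟨by simpa using hv, (PySem.Set.contains_iff _ _).mpr ?_⟩
    simpa [PySem.Set.mem_ofList] using hc

-- ===== VERDICT (by name: the statement is the Claim_ definition above) =====
theorem get_vertical_contiguos_spec : Claim_equal_get_vertical_contiguos := by
  intro t tp _
  unfold Spec_get_vertical_contiguos
  have hA : get_vertical_contiguos t tp
      = ((((PySem.List.sorted2 tp (fun p => p.1) (fun p => p.2)).filter (fun p => p.1 == t)).length : Int))
        - ((connFinset (((PySem.List.sorted2 tp (fun p => p.1) (fun p => p.2)).filter (fun p => p.1 == t)).map (fun p => p.2))).card : Int) := by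
    set s := (PySem.List.sorted2 tp (fun p => p.1) (fun p => p.2)).filter (fun p => p.1 == t) with hs
    unfold get_vertical_contiguos
    show ((PySem.List.pyRange 1 (s.length : Int) 1).foldl
        (fun tops p =>
          if (PySem.List.pyGetD s (p - 1) ((0 : Int), (0 : Int))).2
              ≠ (PySem.List.pyGetD s p ((0 : Int), (0 : Int))).2 - 1
          then tops + 1 else tops)
        (if 1 ≤ s.length then (1 : Int) else 0))
      = (s.length : Int) - ((connFinset (s.map (fun p => p.2))).card : Int)
    have hbody : (fun (tops p : Int) =>
        if (PySem.List.pyGetD s (p - 1) ((0 : Int), (0 : Int))).2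
            ≠ (PySem.List.pyGetD s p ((0 : Int), (0 : Int))).2 - 1
        then tops + 1 else tops)
      = (fun (tops p : Int) =>
          if (!((PySem.List.pyGetD s (p - 1) ((0 : Int), (0 : Int))).2
              == (PySem.List.pyGetD s p ((0 : Int), (0 : Int))).2 - 1)) = true
          then tops + 1 else tops) := by
      funext tops p
      by_cases hc : (PySem.List.pyGetD s (p - 1) ((0 : Int), (0 : Int))).2
          = (PySem.List.pyGetD s p ((0 : Int), (0 : Int))).2 - 1 <;> simp [hc]
    rw [hbody, PySem.List.foldl_count_if]
    have hcp : List.countP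
        (fun p => !((PySem.List.pyGetD s (p - 1) ((0 : Int), (0 : Int))).2
            == (PySem.List.pyGetD s p ((0 : Int), (0 : Int))).2 - 1))
        (PySem.List.pyRange 1 (s.length : Int) 1)
        = List.countP (fun q => !(q.1 == q.2 - 1))
            ((s.map (fun p => p.2)).zip ((s.map (fun p => p.2)).tail)) := by
      rw [← rangeMap_eq_zip s, List.countP_map]
      rfl
    rw [hcp]
    have hm := mainCount (s.map (fun p => p.2)) (by rw [hs]; exact filtered_snd_pairwise t tp)
    rw [List.length_map] at hm
    exact hm
  have hB : get_vertical_contiguos_alt t tp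
      = (((tp.filter (fun p => p.1 == t)).map (fun p => p.2)).length : Int)
        - ((connFinset ((tp.filter (fun p => p.1 == t)).map (fun p => p.2))).card : Int) := by
    unfold get_vertical_contiguos_alt
    show (((tp.filter (fun p => p.1 == t)).map (fun p => p.2)).length : Int)
        - (((PySem.Set.ofList ((tp.filter (fun p => p.1 == t)).map (fun p => p.2))).countP
            (fun v => (PySem.Set.ofList ((tp.filter (fun p => p.1 == t)).map (fun p => p.2))).contains (v - 1)) : Nat) : Int)
      = (((tp.filter (fun p => p.1 == t)).map (fun p => p.2)).length : Int)
        - ((connFinset ((tp.filter (fun p => p.1 == t)).map (fun p => p.2))).card : Int)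
    rw [connCount]
  rw [hA, hB]
  have hperm : (((PySem.List.sorted2 tp (fun p => p.1) (fun p => p.2)).filter (fun p => p.1 == t)).map (fun p => p.2)).Perm
      ((tp.filter (fun p => p.1 == t)).map (fun p => p.2)) :=
    ((PySem.List.sorted2_perm tp (fun p => p.1) (fun p => p.2) false).filter (fun p => p.1 == t)).map (fun p => p.2)
  have hlen := hperm.length_eq
  rw [List.length_map, List.length_map] at hlen
  have hfin : connFinset (((PySem.List.sorted2 tp (fun p => p.1) (fun p => p.2)).filter (fun p => p.1 == t)).map (fun p => p.2))
      = connFinset ((tp.filter (fun p => p.1 == t)).map (fun p => p.2)) := by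
    unfold connFinset
    rw [List.toFinset_eq_of_perm _ _ hperm]
  rw [hfin, hlen]
  simp [List.length_map]
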